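-- pv_equiv track=rewrite | github.com/Exenifix/AIAS | utils/filters/blacklist.py | _apply_super_blacklist_detection
-- ===== SOURCE A (Python) =====
-- def _find_all_characters(s: str, char: str):
--     positions = []
--     for i, s in enumerate(s):
--         if s == char:
--             positions.append(i)
--
--     return positions
--
-- def _apply_wildcard_blacklist_detection(banned_words: list[str], expr: str, break_immediately: bool) -> tuple[bool, str]:
--     is_curse = False
--     for word in banned_words:
--         if word in expr:
--             expr = expr.replace(word, "#" * len(word))
--             is_curse = True
--             if break_immediately:
--                 break
--
--     return is_curse, expr
--
-- def _apply_super_blacklist_detection(banned_words: list[str], expr: str, break_immediately: bool) -> tuple[bool, str]: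
--     spaces_pos = _find_all_characters(expr, " ")
--     is_curse, expr = _apply_wildcard_blacklist_detection(banned_words, expr.replace(" ", ""), break_immediately)
--     if break_immediately:
--         return is_curse, None
--
--     expr_list = list(expr)
--     for i in spaces_pos:
--         expr_list.insert(i, " ")
--
--     return is_curse, "".join(expr_list)
-- ===== SOURCE B (Python) =====
-- def _apply_wildcard_blacklist_detection(banned_words, expr, break_immediately):
--     is_curse = False
--     for word in banned_words:
--         if word in expr:
--             expr = expr.replace(word, "#" * len(word))
--             is_curse = True
--             if break_immediately:
--                 break
--
--     return is_curse, expr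
--
--
-- def _apply_super_blacklist_detection(banned_words, expr, break_immediately):
--     # Same detection on the space-stripped text; reconstruction is a single
--     # parallel walk over the ORIGINAL expr instead of an index table + inserts.
--     is_curse, masked = _apply_wildcard_blacklist_detection(
--         banned_words, expr.replace(" ", ""), break_immediately
--     )
--     if break_immediately:
--         return is_curse, None
--
--     it = iter(masked)
--     out = []
--     for c in expr:
--         out.append(" " if c == " " else next(it))
--     return is_curse, "".join(out)
-- ===== Notes on version B (the rewrite author's own statement) =====
-- stated objective: simpler
-- what changed: Reconstruction no longer builds a table of space indices and replays list.insert at each of them; instead it walks the original expr once in parallel with an iterator over the masked string, emitting ' ' at space positions and the next masked character elsewhere.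
import Mathlib
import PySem

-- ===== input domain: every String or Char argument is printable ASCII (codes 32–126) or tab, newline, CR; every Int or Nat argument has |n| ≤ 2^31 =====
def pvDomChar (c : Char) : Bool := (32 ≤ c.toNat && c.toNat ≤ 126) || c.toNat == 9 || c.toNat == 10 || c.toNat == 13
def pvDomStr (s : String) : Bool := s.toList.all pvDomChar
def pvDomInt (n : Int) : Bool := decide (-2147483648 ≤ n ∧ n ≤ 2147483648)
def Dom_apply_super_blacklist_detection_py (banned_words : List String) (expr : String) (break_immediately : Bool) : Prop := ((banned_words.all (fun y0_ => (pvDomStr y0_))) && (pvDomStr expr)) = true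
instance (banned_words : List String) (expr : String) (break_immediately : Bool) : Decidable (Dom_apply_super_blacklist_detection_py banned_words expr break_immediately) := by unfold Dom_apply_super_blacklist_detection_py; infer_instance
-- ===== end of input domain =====

-- ===== PORT A =====
-- B changes only the reconstruction step: it replaces A's space-index table and the
-- repeated list.insert replay with one parallel left-to-right walk of the original expr (objective: simpler).

-- port of _find_all_characters (A calls it with the one-char string " "; char is that character)
def find_all_characters_py (s : List Char) (char : Char) : List Int :=
  (PySem.List.enumerate s 0).foldl (fun positions p => if p.2 == char then positions ++ [p.1] else positions) []

-- port of _apply_wildcard_blacklist_detection, the detection step both A and B contain verbatim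
-- (the for-loop with break as recursion over banned_words; is_curse is the loop state)
def wildcard_blacklist_detection_py (banned_words : List String) (expr : List Char) (break_immediately : Bool) (is_curse : Bool) : Bool × List Char :=
  match banned_words with
  | [] => (is_curse, expr)
  | word :: rest =>
    if PySem.Chars.isIn word.toList expr then
      let expr' := PySem.Chars.replace expr word.toList (List.replicate word.toList.length '#')
      if break_immediately then (true, expr')
      else wildcard_blacklist_detection_py rest expr' break_immediately true
    else wildcard_blacklist_detection_py rest expr break_immediately is_curse

def apply_super_blacklist_detection_py (banned_words : List String) (expr : String) (break_immediately : Bool) : Bool × Option String :=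
  let spaces_pos := find_all_characters_py expr.toList ' '
  let r := wildcard_blacklist_detection_py banned_words (PySem.Chars.replace expr.toList [' '] []) break_immediately false
  if break_immediately then (r.1, none)
  else
    let expr_list := spaces_pos.foldl (fun l i => PySem.List.insert l i ' ') r.2
    (r.1, some (String.ofList expr_list))

-- ===== PORT B =====
-- the parallel walk: ' ' where the original has a space, else the next masked character
def merge_spaces (orig : List Char) (masked : List Char) : List Char :=
  match orig, masked with
  | [], _ => []
  | c :: rest, masked =>
    if c = ' ' then ' ' :: merge_spaces rest masked
    else
      match masked with
      | m :: t => m :: merge_spaces rest t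
      | [] => []  -- unreachable: the masked text has one character per non-space of orig

def apply_super_blacklist_detection_py_alt (banned_words : List String) (expr : String) (break_immediately : Bool) : Bool × Option String :=
  let r := wildcard_blacklist_detection_py banned_words (PySem.Chars.replace expr.toList [' '] []) break_immediately false
  if break_immediately then (r.1, none)
  else (r.1, some (String.ofList (merge_spaces expr.toList r.2)))

-- ===== PRECONDITION & SPEC =====
def Spec_apply_super_blacklist_detection_py (banned_words : List String) (expr : String) (break_immediately : Bool) (out : Bool × Option String) : Prop := out = apply_super_blacklist_detection_py_alt banned_words expr break_immediately
instance (banned_words : List String) (expr : String) (break_immediately : Bool) (out : Bool × Option String) : Decidable (Spec_apply_super_blacklist_detection_py banned_words expr break_immediately out) := by unfold Spec_apply_super_blacklist_detection_py; infer_instance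

-- ===== CLAIM (what is proved, stated in full; the proofs are below) =====
def Claim_equal_apply_super_blacklist_detection_py : Prop := ∀ (banned_words : List String) (expr : String) (break_immediately : Bool), Dom_apply_super_blacklist_detection_py banned_words expr break_immediately → Spec_apply_super_blacklist_detection_py banned_words expr break_immediately (apply_super_blacklist_detection_py banned_words expr break_immediately)

-- ===== LEMMAS AND PROOFS =====

-- replace.go keeps the length when the replacement has the pattern's length
theorem replace_go_length (old new : List Char) (h : new.length = old.length) (hne : old ≠ [])
    (fuel : Nat) (l acc : List Char) (hf : l.length ≤ fuel) :
    (PySem.Chars.replace.go old new fuel l acc).length = acc.length + l.length := by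
  induction fuel generalizing l acc with
  | zero =>
    simp [PySem.Chars.replace.go]
  | succ n ih =>
    cases l with
    | nil => simp [PySem.Chars.replace.go]
    | cons c t =>
      rw [PySem.Chars.replace.go]
      split_ifs with hp
      · have hpre : old <+: (c :: t) := List.isPrefixOf_iff_prefix.mp hp
        have hle : old.length ≤ (c :: t).length := hpre.length_le
        have hold : 0 < old.length := List.length_pos_iff.mpr hne
        rw [ih _ _ (by simp at hf ⊢; omega)]
        simp at hle ⊢
        omega
      · rw [ih _ _ (by simp at hf ⊢; omega)]
        simp
        omega

-- replace keeps the length when the replacement has the pattern's length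
theorem replace_length (s old new : List Char) (h : new.length = old.length) :
    (PySem.Chars.replace s old new).length = s.length := by
  rw [PySem.Chars.replace]
  split_ifs with he
  · have : old = [] := List.isEmpty_iff.mp he
    subst this
    have hn : new = [] := by simpa using h
    subst hn
    induction s with
    | nil => simp
    | cons a b ihb => simp [ihb]
  · rw [replace_go_length old new h (by simpa [List.isEmpty_iff] using he) s.length s [] le_rfl]
    simp

-- the wildcard detection never changes the length of the text
theorem wildcard_length (banned_words : List String) (expr : List Char) (brk ic : Bool) :
    (wildcard_blacklist_detection_py banned_words expr brk ic).2.length = expr.length := by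
  induction banned_words generalizing expr ic with
  | nil => rfl
  | cons w rest ih =>
    rw [wildcard_blacklist_detection_py]
    split_ifs with h1 h2
    · simp [replace_length]
    · rw [ih]
      simp [replace_length]
    · exact ih expr ic

-- stripping one character with replace is filtering it out
theorem replace_go_filter (c : Char) (fuel : Nat) (l acc : List Char) (hf : l.length ≤ fuel) :
    PySem.Chars.replace.go [c] [] fuel l acc = acc.reverse ++ l.filter (fun x => x ≠ c) := by
  induction fuel generalizing l acc with
  | zero =>
    have : l = [] := by simpa using hf
    subst this; simp [PySem.Chars.replace.go]
  | succ n ih =>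
    cases l with
    | nil => simp [PySem.Chars.replace.go]
    | cons a t =>
      rw [PySem.Chars.replace.go]
      split_ifs with hp
      · have : a = c := by
          have := List.isPrefixOf_iff_prefix.mp hp
          rcases this with ⟨u, hu⟩
          cases hu; rfl
        subst this
        rw [ih _ _ (by simp at hf ⊢; omega)]
        simp
      · have hac : ¬ a = c := by
          intro hac; subst hac
          simp [List.isPrefixOf] at hp
        rw [ih _ _ (by simp at hf ⊢; omega)]
        simp [hac]

theorem replace_filter (s : List Char) (c : Char) :
    PySem.Chars.replace s [c] [] = s.filter (fun x => x ≠ c) := by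
  rw [PySem.Chars.replace]
  simp only [List.isEmpty_cons, Bool.false_eq_true, if_false]
  rw [replace_go_filter c s.length s [] le_rfl]
  simp

-- Python list.insert at i+1 (i ≥ 0) into x :: l keeps x and inserts at i in l
theorem insert_cons_shift (x v : Char) (l : List Char) (i : Int) (hi : 0 ≤ i) :
    PySem.List.insert (x :: l) (i + 1) v = x :: PySem.List.insert l i v := by
  simp only [PySem.List.insert, PySem.List.sliceIndices]
  norm_num
  split_ifs with h1 h2 <;> try omega
  have e1 : (min i (l.length:Int) + 1).toNat = (min i (l.length:Int)).toNat + 1 := by omega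
  rw [e1]
  simp [List.take_succ_cons, List.drop_succ_cons]

theorem foldl_insert_shift (ps : List Int) (hps : ∀ p ∈ ps, 0 ≤ p) (x : Char) (l : List Char) :
    (ps.map (· + 1)).foldl (fun l i => PySem.List.insert l i ' ') (x :: l)
      = x :: ps.foldl (fun l i => PySem.List.insert l i ' ') l := by
  induction ps generalizing l with
  | nil => rfl
  | cons p t ih =>
    simp only [List.map_cons, List.foldl_cons]
    rw [insert_cons_shift x ' ' l p (hps p (by simp))]
    exact ih (fun q hq => hps q (by simp [hq])) _

theorem enumerate_cons_shift (t : List Char) (s : Int) :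
    PySem.List.enumerate t s = (PySem.List.enumerate t 0).map (fun p => (p.1 + s, p.2)) := by
  induction t generalizing s with
  | nil => rfl
  | cons a b ih =>
    rw [PySem.List.enumerate, PySem.List.enumerate]
    simp only [zero_add]
    rw [ih (s+1), ih 1]
    simp only [List.map_cons, List.map_map, List.cons.injEq]
    refine ⟨by simp, ?_⟩
    apply List.map_congr_left
    intro p _
    simp [Prod.ext_iff]
    omega

theorem find_all_eq (s : List Char) (ch : Char) :
    find_all_characters_py s ch
      = ((PySem.List.enumerate s 0).filter (fun p => p.2 == ch)).map (fun p => p.1) := by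
  unfold find_all_characters_py
  rw [PySem.List.foldl_append_if (fun (p : Int × Char) => p.2 == ch) (fun p => p.1)]
  simp

theorem find_all_cons (c : Char) (t : List Char) (ch : Char) :
    find_all_characters_py (c :: t) ch
      = (if c = ch then [(0 : Int)] else []) ++ (find_all_characters_py t ch).map (· + 1) := by
  rw [find_all_eq, find_all_eq]
  rw [PySem.List.enumerate]
  simp only [zero_add]
  rw [enumerate_cons_shift t 1]
  simp only [List.filter_cons, List.filter_map, List.map_map]
  by_cases hc : c = ch
  · simp [hc, List.map_map]
    rfl
  · simp [hc]
    rfl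

theorem find_all_nonneg (s : List Char) (ch : Char) : ∀ p ∈ find_all_characters_py s ch, 0 ≤ p := by
  induction s with
  | nil => intro p hp; simp [find_all_characters_py, PySem.List.enumerate] at hp
  | cons c t ih =>
    intro p hp
    rw [find_all_cons] at hp
    simp only [List.mem_append, List.mem_map] at hp
    rcases hp with hp | ⟨q, hq, rfl⟩
    · split_ifs at hp <;> simp_all
    · have := ih q hq; omega

-- the heart: replaying the inserts at A's space positions is B's parallel walk
theorem insert_fold_eq_merge (cs masked : List Char)
    (h : masked.length = (cs.filter (fun x => x ≠ ' ')).length) :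
    (find_all_characters_py cs ' ').foldl (fun l i => PySem.List.insert l i ' ') masked
      = merge_spaces cs masked := by
  induction cs generalizing masked with
  | nil =>
    have : masked = [] := by simpa using h
    subst this
    rfl
  | cons c t ih =>
    rw [find_all_cons]
    by_cases hc : c = ' '
    · subst hc
      rw [show merge_spaces (' ' :: t) masked = ' ' :: merge_spaces t masked from rfl]
      simp only [if_true, List.singleton_append, List.foldl_cons]
      have h0 : PySem.List.insert masked 0 ' ' = ' ' :: masked := PySem.List.insert_zero masked ' '
      rw [h0, foldl_insert_shift _ (find_all_nonneg t ' ')]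
      rw [ih masked (by simpa using h)]
    · rw [if_neg hc]
      cases masked with
      | nil => simp [List.filter_cons, hc] at h
      | cons m mt =>
        rw [show merge_spaces (c :: t) (m :: mt) = if c = ' ' then ' ' :: merge_spaces t (m :: mt) else m :: merge_spaces t mt from rfl]
        simp only [List.nil_append, if_neg hc]
        rw [foldl_insert_shift _ (find_all_nonneg t ' ')]
        rw [ih mt (by simpa [List.filter_cons, hc] using h)]

-- ===== VERDICT (by name: the statement is the Claim_ definition above) =====
theorem apply_super_blacklist_detection_py_spec : Claim_equal_apply_super_blacklist_detection_py := by
  intro bw expr brk _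
  unfold Spec_apply_super_blacklist_detection_py
  unfold apply_super_blacklist_detection_py apply_super_blacklist_detection_py_alt
  cases brk with
  | true => simp
  | false =>
    simp only [if_neg (by simp : ¬ (false = true))]
    refine Prod.ext rfl ?_
    simp only [Option.some.injEq]
    congr 1
    exact insert_fold_eq_merge expr.toList _ (by
      rw [wildcard_length, replace_filter])
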